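-- pv_equiv track=rewrite | github.com/ju4ndrc/Python-lessons | Excersices/main.py | prueb
-- ===== SOURCE A (Python) =====
-- def prueb(code):
--
--     length = len(code)
--     cont = 0
--
--     for i in reversed(range(0, length)):
--         if code[i].isalpha() and code[cont].isalpha():
--             if code[i] != code[cont]:
--                 return False
--             cont = cont + 1
--     return True
-- ===== SOURCE B (Python) =====
-- def prueb(code):
--     # leading run of alphabetic characters
--     L = 0
--     while L < len(code) and code[L].isalpha():
--         L += 1
--     # alphabetic characters read from the right
--     alpha_rev = [c for c in reversed(code) if c.isalpha()]
--     for k in range(min(L, len(alpha_rev))):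
--         if code[k] != alpha_rev[k]:
--             return False
--     return True
-- ===== Notes on version B (the rewrite author's own statement) =====
-- stated objective: alternative
-- what changed: Replaces A's single coupled-pointer pass (a right-to-left scan whose left pointer advances only on matched alpha pairs) by a precompute-then-compare decomposition: first the leading alpha-run length L and the list of alphabetic characters from the right, then one plain comparison loop over min(L, #alphas) positions.
import Mathlib
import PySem

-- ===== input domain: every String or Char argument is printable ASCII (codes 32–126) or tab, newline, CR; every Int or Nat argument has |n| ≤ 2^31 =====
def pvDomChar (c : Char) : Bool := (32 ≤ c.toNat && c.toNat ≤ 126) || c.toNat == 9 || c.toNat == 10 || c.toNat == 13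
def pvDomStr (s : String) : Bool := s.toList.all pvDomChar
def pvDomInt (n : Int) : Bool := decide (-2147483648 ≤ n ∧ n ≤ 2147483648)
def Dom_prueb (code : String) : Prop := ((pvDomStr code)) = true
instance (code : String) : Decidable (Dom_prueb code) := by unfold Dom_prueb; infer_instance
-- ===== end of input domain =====

-- B replaces A's coupled-pointer right-to-left scan by precomputing the leading
-- alpha-run length and the alpha characters from the right, then one plain
-- comparison loop (objective: alternative decomposition, same cost).

-- ===== PORT A =====
-- A's loop over reversed(range(0, length)) with early return, state cont.
-- All indexing in A is provably in range, so getD with default ' ' is exact.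
def pruebGo (cs : List Char) : List Nat → Nat → Bool
  | [], _ => true
  | i :: rest, cont =>
    if PySem.Chars.isalpha (cs.getD i ' ') && PySem.Chars.isalpha (cs.getD cont ' ') then
      if cs.getD i ' ' ≠ cs.getD cont ' ' then false
      else pruebGo cs rest (cont + 1)
    else pruebGo cs rest cont

def prueb (code : String) : Bool :=
  pruebGo code.toList ((List.range code.toList.length).reverse) 0

-- ===== PORT B =====
-- Source B's while loop counting the leading run of alphabetic characters
def leadAlpha : List Char → Nat
  | [] => 0
  | c :: rest => if PySem.Chars.isalpha c then leadAlpha rest + 1 else 0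

-- Source B's for-loop over range(min(L, len(alpha_rev))) with early return
def altGo (cs ar : List Char) : List Nat → Bool
  | [] => true
  | k :: rest =>
    if cs.getD k ' ' ≠ ar.getD k ' ' then false
    else altGo cs ar rest

def prueb_alt (code : String) : Bool :=
  let cs := code.toList
  let L := leadAlpha cs
  let ar := cs.reverse.filter PySem.Chars.isalpha
  altGo cs ar (List.range (min L ar.length))

-- ===== PRECONDITION & SPEC =====
def Spec_prueb (code : String) (out : Bool) : Prop := out = prueb_alt code
instance (code : String) (out : Bool) : Decidable (Spec_prueb code out) := by unfold Spec_prueb; infer_instance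

-- ===== CLAIM (what is proved, stated in full; the proofs are below) =====
def Claim_equal_prueb : Prop := ∀ (code : String), Dom_prueb code → Spec_prueb code (prueb code)

-- ===== LEMMAS AND PROOFS =====

-- A's loop rephrased as a left-to-right walk over the reversed character list
def go2 (cs : List Char) : List Char → Nat → Bool
  | [], _ => true
  | x :: rest, c =>
    if PySem.Chars.isalpha x && PySem.Chars.isalpha (cs.getD c ' ') then
      if x ≠ cs.getD c ' ' then false
      else go2 cs rest (c + 1)
    else go2 cs rest c

theorem pruebGo_eq_go2 (cs : List Char) :
    ∀ m, m ≤ cs.length → ∀ c,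
      pruebGo cs ((List.range m).reverse) c = go2 cs (cs.reverse.drop (cs.length - m)) c := by
  intro m
  induction m with
  | zero =>
    intro _ c
    have hnil : List.drop cs.length cs.reverse = [] := by
      simp
    rw [Nat.sub_zero, hnil]; rfl
  | succ m ih =>
    intro hm c
    have hm' : m < cs.length := hm
    have hdrop : cs.reverse.drop (cs.length - (m + 1)) =
        cs[m] :: cs.reverse.drop (cs.length - m) := by
      have hlt : cs.length - (m + 1) < cs.reverse.length := by
        simp; omega
      rw [List.drop_eq_getElem_cons hlt]
      congr 1
      · rw [List.getElem_reverse]; congr 1; omega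
      · congr 1; omega
    have hget : cs.getD m ' ' = cs[m] := List.getD_eq_getElem cs ' ' hm'
    rw [hdrop]
    simp only [List.range_succ, List.reverse_append, List.reverse_cons, List.reverse_nil,
      List.nil_append, List.cons_append, List.nil_append]
    show pruebGo cs (m :: (List.range m).reverse) c = _
    simp only [pruebGo, go2, hget]
    split
    · split
      · rfl
      · exact ih (le_of_lt hm') (c + 1)
    · exact ih (le_of_lt hm') c

theorem leadAlpha_lt (cs : List Char) :
    ∀ k, k < leadAlpha cs → PySem.Chars.isalpha (cs.getD k ' ') = true := by
  induction cs with
  | nil => intro k hk; simp [leadAlpha] at hk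
  | cons x rest ih =>
    intro k hk
    by_cases hx : PySem.Chars.isalpha x
    · cases k with
      | zero => simpa using hx
      | succ k =>
        simp only [leadAlpha, if_pos hx] at hk
        exact ih k (by omega)
    · simp [leadAlpha, if_neg hx] at hk

theorem leadAlpha_at (cs : List Char) :
    PySem.Chars.isalpha (cs.getD (leadAlpha cs) ' ') = false := by
  induction cs with
  | nil => decide
  | cons x rest ih =>
    by_cases hx : PySem.Chars.isalpha x
    · simpa [leadAlpha, if_pos hx] using ih
    · simpa [leadAlpha, if_neg hx] using eq_false_of_ne_true hx

theorem go2_frozen (cs : List Char) (c : Nat)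
    (hc : PySem.Chars.isalpha (cs.getD c ' ') = false) :
    ∀ rl, go2 cs rl c = true := by
  intro rl
  induction rl with
  | nil => rfl
  | cons x rest ih =>
    simp only [go2, hc, Bool.and_false]
    simpa using ih

theorem go2_eq_all (cs : List Char) :
    ∀ (rl : List Char) (c : Nat), c ≤ leadAlpha cs →
      go2 cs rl c =
        (List.range (min (leadAlpha cs - c) ((rl.filter PySem.Chars.isalpha).length))).all
          (fun j => cs.getD (c + j) ' ' == (rl.filter PySem.Chars.isalpha).getD j ' ') := by
  intro rl
  induction rl with
  | nil => intro c _; simp [go2]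
  | cons x rest ih =>
    intro c hc
    by_cases hx : PySem.Chars.isalpha x
    · rcases Nat.lt_or_ge c (leadAlpha cs) with hlt | hge
      · -- c < L : the pair is compared
        have hca : PySem.Chars.isalpha (cs.getD c ' ') = true := leadAlpha_lt cs c hlt
        have hfil : (x :: rest).filter PySem.Chars.isalpha =
            x :: rest.filter PySem.Chars.isalpha := List.filter_cons_of_pos hx
        set fr := rest.filter PySem.Chars.isalpha with hfr
        have hmin : min (leadAlpha cs - c) ((x :: fr).length) =
            min (leadAlpha cs - (c + 1)) fr.length + 1 := by
          simp only [List.length_cons]; omega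
        rw [hfil, hmin]
        simp only [go2, hx, hca, Bool.and_self]
        rw [if_pos trivial, List.range_succ_eq_map, List.all_cons]
        by_cases heq : x = cs.getD c ' '
        · rw [if_neg (by simpa using heq)]
          have h0 : (cs.getD (c + 0) ' ' == (x :: fr).getD 0 ' ') = true := by
            simp only [Nat.add_zero, List.getD_cons_zero]
            exact beq_iff_eq.mpr heq.symm
          rw [h0, Bool.true_and, List.all_map, ih (c + 1) (by omega)]
          apply congrArg
          funext j
          have harith : c + 1 + j = c + (j + 1) := by omega
          simp only [Function.comp_apply, harith, Nat.succ_eq_add_one, List.getD_cons_succ]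
        · rw [if_pos heq]
          have h0 : (cs.getD (c + 0) ' ' == (x :: fr).getD 0 ' ') = false := by
            simp only [Nat.add_zero, List.getD_cons_zero]
            exact beq_eq_false_iff_ne.mpr (fun h => heq h.symm)
          rw [h0, Bool.false_and]
      · -- c = L : left pointer is frozen, everything skipped
        have hceq : c = leadAlpha cs := le_antisymm hc hge
        have hca : PySem.Chars.isalpha (cs.getD c ' ') = false := by
          rw [hceq]; exact leadAlpha_at cs
        simp only [go2, hca, Bool.and_false]
        rw [if_neg (by simp), go2_frozen cs c hca rest]
        have hz : leadAlpha cs - c = 0 := by omega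
        simp [hz]
    · -- x not alphabetic: skipped by both sides
      have hfil : (x :: rest).filter PySem.Chars.isalpha =
          rest.filter PySem.Chars.isalpha := List.filter_cons_of_neg hx
      simp only [go2, eq_false_of_ne_true hx, Bool.false_and]
      rw [if_neg (by simp), hfil, ih c hc]

theorem altGo_eq_all (cs ar : List Char) :
    ∀ ks : List Nat, altGo cs ar ks = ks.all (fun k => cs.getD k ' ' == ar.getD k ' ') := by
  intro ks
  induction ks with
  | nil => rfl
  | cons k rest ih =>
    simp only [altGo, List.all_cons, ih, beq_eq_decide]
    by_cases h : cs.getD k ' ' = ar.getD k ' '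
    · simp_all
    · simp_all

-- ===== VERDICT (by name: the statement is the Claim_ definition above) =====
theorem prueb_spec : Claim_equal_prueb := by
  intro code _
  unfold Spec_prueb prueb prueb_alt
  set cs := code.toList with hcs
  rw [pruebGo_eq_go2 cs cs.length le_rfl 0]
  rw [Nat.sub_self, List.drop_zero]
  rw [go2_eq_all cs cs.reverse 0 (Nat.zero_le _)]
  rw [altGo_eq_all]
  simp
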